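-- pv_equiv track=rewrite | github.com/CRC-FONDA/workflow_collections_analysis | snakemake_analysis/analysis/operators/dag_analysis.py | get_all_operator_pairs
-- ===== SOURCE A (Python) =====
-- def get_all_operator_pairs(paths):
--     operator_pairs = []
--     for path in paths:
--         preceding_operators = []
--         for node, operators in path:
--             if operators:
--                 if preceding_operators:
--                     for operator in operators:
--                         for preceding_operator in preceding_operators:
--                             operator_pairs.append((preceding_operator, operator))
--                 preceding_operators = operators
--             else:
--                 preceding_operators = []
--     return operator_pairs
-- ===== SOURCE B (Python) =====
-- def _nonempty_runs(groups):
--     runs = []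
--     run = []
--     for g in groups:
--         if g:
--             run.append(g)
--         else:
--             if run:
--                 runs.append(run)
--             run = []
--     if run:
--         runs.append(run)
--     return runs
--
--
-- def _chain_pairs(segment):
--     if len(segment) < 2:
--         return []
--     return [(p, o) for o in segment[1] for p in segment[0]] + _chain_pairs(segment[1:])
--
--
-- def get_all_operator_pairs(paths):
--     pairs = []
--     for path in paths:
--         for segment in _nonempty_runs([ops for _, ops in path]):
--             pairs.extend(_chain_pairs(segment))
--     return pairs
-- ===== Notes on version B (the rewrite author's own statement) =====
-- stated objective: alternative
-- what changed: Replaces A's single stateful pass (a preceding_operators variable with reset-on-empty) by a two-stage algorithm: first split each path's operator groups into maximal runs of non-empty groups, then recursively emit the cross product of consecutive groups within each run.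
import Mathlib
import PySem

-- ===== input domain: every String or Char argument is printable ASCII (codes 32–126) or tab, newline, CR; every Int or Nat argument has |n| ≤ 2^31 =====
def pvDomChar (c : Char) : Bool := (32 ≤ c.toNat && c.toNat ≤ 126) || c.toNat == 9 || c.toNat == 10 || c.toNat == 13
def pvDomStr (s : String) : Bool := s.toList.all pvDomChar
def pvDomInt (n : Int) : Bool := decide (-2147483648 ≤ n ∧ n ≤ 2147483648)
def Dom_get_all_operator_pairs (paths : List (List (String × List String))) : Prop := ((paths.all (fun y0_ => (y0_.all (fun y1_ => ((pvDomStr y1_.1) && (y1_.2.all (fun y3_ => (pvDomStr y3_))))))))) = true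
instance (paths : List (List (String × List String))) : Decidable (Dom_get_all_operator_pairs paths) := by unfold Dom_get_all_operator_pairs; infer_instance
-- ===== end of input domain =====

-- B replaces A's single stateful pass (preceding_operators with reset-on-empty) by a
-- two-stage algorithm: split each path's operator groups into maximal runs of non-empty
-- groups, then recursively emit products of consecutive groups within each run.

-- ===== PORT A =====
-- inner body of the two nested append loops:
-- for operator in operators: for preceding_operator in preceding_operators: append
def pvAppendLoop (pre : List String) (ops : List String)
    (pairs : List (String × String)) : List (String × String) :=
  ops.foldl (fun ps o => pre.foldl (fun ps2 p => ps2 ++ [(p, o)]) ps) pairs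

-- one step of 'for node, operators in path'
def pvStepA (st : List (String × String) × List String) (entry : String × List String) :
    List (String × String) × List String :=
  if entry.2 ≠ [] then
    (if st.2 ≠ [] then (pvAppendLoop st.2 entry.2 st.1, entry.2) else (st.1, entry.2))
  else (st.1, [])

def get_all_operator_pairs (paths : List (List (String × List String))) : List (String × String) :=
  paths.foldl (fun pairs path => (path.foldl pvStepA (pairs, [])).1) []

-- ===== PORT B =====
-- _nonempty_runs: split a list of groups into the maximal runs of non-empty groups
def pvRunsStep (st : List (List (List String)) × List (List String)) (g : List String) :
    List (List (List String)) × List (List String) :=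
  if g ≠ [] then (st.1, st.2 ++ [g])
  else (if st.2 ≠ [] then st.1 ++ [st.2] else st.1, [])

def pvRuns (groups : List (List String)) : List (List (List String)) :=
  let st := groups.foldl pvRunsStep ([], [])
  if st.2 ≠ [] then st.1 ++ [st.2] else st.1

-- _chain_pairs: recursive emission of the product of consecutive groups of one run
def pvChainPairs : List (List String) → List (String × String)
  | [] => []
  | [_] => []
  | h :: s :: rest => s.flatMap (fun o => h.map (fun p => (p, o))) ++ pvChainPairs (s :: rest)

def get_all_operator_pairs_alt (paths : List (List (String × List String))) : List (String × String) :=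
  paths.foldl (fun pairs path =>
    (pvRuns (path.map Prod.snd)).foldl (fun ps seg => ps ++ pvChainPairs seg) pairs) []

-- ===== PRECONDITION & SPEC =====
def Spec_get_all_operator_pairs (paths : List (List (String × List String))) (out : List (String × String)) : Prop := out = get_all_operator_pairs_alt paths
instance (paths : List (List (String × List String))) (out : List (String × String)) : Decidable (Spec_get_all_operator_pairs paths out) := by unfold Spec_get_all_operator_pairs; infer_instance

-- ===== CLAIM (what is proved, stated in full; the proofs are below) =====
def Claim_equal_get_all_operator_pairs : Prop := ∀ (paths : List (List (String × List String))), Dom_get_all_operator_pairs paths → Spec_get_all_operator_pairs paths (get_all_operator_pairs paths)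

-- ===== LEMMAS AND PROOFS =====

-- product of two operator groups, in A's emission order (operator outer, preceding inner)
def pvProd (pre ops : List String) : List (String × String) :=
  ops.flatMap (fun o => pre.map (fun p => (p, o)))

-- what A's inner loop emits over a path, starting from preceding operators `pre`
def pvEmit : List String → List (String × List String) → List (String × String)
  | _, [] => []
  | pre, (_, ops) :: rest =>
      if ops ≠ [] then (if pre ≠ [] then pvProd pre ops else []) ++ pvEmit ops rest
      else pvEmit [] rest

-- the same emission expressed over the bare group lists
def pvEmitG : List String → List (List String) → List (String × String)
  | _, [] => []
  | pre, g :: rest =>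
      if g ≠ [] then (if pre ≠ [] then pvProd pre g else []) ++ pvEmitG g rest
      else pvEmitG [] rest

-- last group of a run ([] for the empty run)
def pvLastG : List (List String) → List String
  | [] => []
  | [x] => x
  | _ :: x :: xs => pvLastG (x :: xs)

theorem pvAppendLoop_eq (pre ops : List String) (pairs : List (String × String)) :
    pvAppendLoop pre ops pairs = pairs ++ pvProd pre ops := by
  induction ops generalizing pairs with
  | nil => simp [pvAppendLoop, pvProd]
  | cons o os ih =>
    have inner : ∀ (l : List String) (acc : List (String × String)),
        l.foldl (fun ps2 p => ps2 ++ [(p, o)]) acc = acc ++ l.map (fun p => (p, o)) := by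
      intro l
      induction l with
      | nil => simp
      | cons x xs ihx => intro acc; simp [ihx]
    simp only [pvAppendLoop, List.foldl_cons] at *
    rw [ih, inner]
    simp [pvProd]

theorem pvFoldA_eq (path : List (String × List String)) (pre : List String)
    (pairs : List (String × String)) :
    (path.foldl pvStepA (pairs, pre)).1 = pairs ++ pvEmit pre path := by
  induction path generalizing pre pairs with
  | nil => simp [pvEmit]
  | cons e rest ih =>
    obtain ⟨n, ops⟩ := e
    by_cases hops : ops = []
    · subst hops
      simp [pvStepA, pvEmit, ih]
    · by_cases hpre : pre = []
      · subst hpre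
        simp [pvStepA, hops, pvEmit, ih]
      · simp [pvStepA, hops, hpre, pvEmit, ih, pvAppendLoop_eq]

theorem pvEmit_eq_emitG (path : List (String × List String)) (pre : List String) :
    pvEmit pre path = pvEmitG pre (path.map Prod.snd) := by
  induction path generalizing pre with
  | nil => simp [pvEmit, pvEmitG]
  | cons e rest ih =>
    obtain ⟨n, ops⟩ := e
    by_cases hops : ops = []
    · subst hops; simp [pvEmit, pvEmitG, ih]
    · simp [pvEmit, pvEmitG, hops, ih]

theorem pvLastG_append_one (l : List (List String)) (g : List String) :
    pvLastG (l ++ [g]) = g := by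
  induction l with
  | nil => rfl
  | cons x xs ih =>
    cases xs with
    | nil => rfl
    | cons y ys => simpa [pvLastG] using ih

theorem pvLastG_mem (l : List (List String)) (h : l ≠ []) : pvLastG l ∈ l := by
  induction l with
  | nil => exact absurd rfl h
  | cons x xs ih =>
    cases xs with
    | nil => simp [pvLastG]
    | cons y ys =>
      have hm := ih (by simp)
      simp only [pvLastG]
      exact List.mem_cons_of_mem _ hm

theorem pvChain_append_one (cur : List (List String)) (g : List String) :
    pvChainPairs (cur ++ [g])
      = pvChainPairs cur ++ (if cur ≠ [] then pvProd (pvLastG cur) g else []) := by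
  induction cur with
  | nil => simp [pvChainPairs]
  | cons x xs ih =>
    cases xs with
    | nil => simp [pvChainPairs, pvLastG, pvProd]
    | cons y ys =>
      simp only [List.cons_append, pvChainPairs, pvLastG] at *
      rw [ih]
      simp

theorem pvRunsInv (groups : List (List String)) (runs0 : List (List (List String)))
    (cur : List (List String)) (h : ∀ x ∈ cur, x ≠ []) :
    (let st := groups.foldl pvRunsStep (runs0, cur);
      (if st.2 ≠ [] then st.1 ++ [st.2] else st.1).flatMap pvChainPairs)
      = runs0.flatMap pvChainPairs ++ pvChainPairs cur ++ pvEmitG (pvLastG cur) groups := by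
  induction groups generalizing runs0 cur with
  | nil =>
    by_cases hc : cur = []
    · subst hc; simp [pvEmitG, pvChainPairs]
    · simp [hc, pvEmitG]
  | cons g rest ih =>
    by_cases hg : g = []
    · subst hg
      by_cases hc : cur = []
      · subst hc
        simp only [List.foldl_cons, pvRunsStep]
        have := ih runs0 [] (by simp)
        simpa [pvEmitG, pvChainPairs, pvLastG] using this
      · simp only [List.foldl_cons, pvRunsStep]
        have := ih (runs0 ++ [cur]) [] (by simp)
        simp only [ne_eq, not_true_eq_false, if_false, ite_not] at this ⊢
        simp [this, pvEmitG, pvChainPairs, pvLastG, hc]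
    · simp only [List.foldl_cons, pvRunsStep]
      have hall : ∀ x ∈ cur ++ [g], x ≠ [] := by
        intro x hx
        rcases List.mem_append.mp hx with hx | hx
        · exact h x hx
        · simp at hx; simpa [hx] using hg
      have := ih runs0 (cur ++ [g]) hall
      simp only [ne_eq, hg, not_false_eq_true, if_true] at this ⊢
      rw [this, pvLastG_append_one, pvChain_append_one]
      by_cases hc : cur = []
      · subst hc; simp [pvEmitG, hg, pvLastG]
      · have hl : pvLastG cur ≠ [] := h _ (pvLastG_mem cur hc)
        simp [pvEmitG, hg, hc, hl, pvProd]

theorem pvRuns_flat (groups : List (List String)) :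
    (pvRuns groups).flatMap pvChainPairs = pvEmitG [] groups := by
  have := pvRunsInv groups [] [] (by simp)
  simpa [pvRuns, pvChainPairs, pvLastG] using this

theorem pvFoldRuns (l : List (List (List String))) (acc : List (String × String)) :
    l.foldl (fun ps seg => ps ++ pvChainPairs seg) acc = acc ++ l.flatMap pvChainPairs := by
  induction l generalizing acc with
  | nil => simp
  | cons x xs ih => simp [ih]

theorem pvMain (paths : List (List (String × List String))) (acc : List (String × String)) :
    paths.foldl (fun pairs path => (path.foldl pvStepA (pairs, ([] : List String))).1) acc
      = paths.foldl (fun pairs path =>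
          (pvRuns (path.map Prod.snd)).foldl (fun ps seg => ps ++ pvChainPairs seg) pairs) acc := by
  induction paths generalizing acc with
  | nil => rfl
  | cons path rest ih =>
    simp only [List.foldl_cons]
    rw [pvFoldA_eq, pvFoldRuns, pvRuns_flat, pvEmit_eq_emitG]
    exact ih _

-- ===== VERDICT (by name: the statement is the Claim_ definition above) =====
theorem get_all_operator_pairs_spec : Claim_equal_get_all_operator_pairs := by
  intro paths _
  show get_all_operator_pairs paths = get_all_operator_pairs_alt paths
  unfold get_all_operator_pairs get_all_operator_pairs_alt
  exact pvMain paths []
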